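-- pv_equiv track=rewrite | github.com/carolinaferreiraPUCRS/Projeto_Otimizacao | 1-exercicio-de-reaquecimento-solucao-master/src/main/python/Recursion.py | mult_vet1
-- ===== SOURCE A (Python) =====
-- def mult_vet1(vet, pos=0):
--     if pos < 0 or pos >= len(vet) or vet is None:
--         raise ValueError("Nro negativo!")
--     elif len(vet) == 0:
--         return 0
--     elif pos == len(vet) - 1:
--         return vet[pos]
--     else:
--         return vet[pos] * mult_vet1(vet, pos + 1)
-- ===== SOURCE B (Python) =====
-- def mult_vet1(vet, pos=0):
--     if pos < 0 or pos >= len(vet) or vet is None: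
--         raise ValueError("Nro negativo!")
--     result = 1
--     for i in range(pos, len(vet)):
--         result *= vet[i]
--     return result
-- ===== Notes on version B (the rewrite author's own statement) =====
-- stated objective: simpler
-- what changed: Replaces the tail recursion (with its dead empty-list and last-element branches) by a single iterative accumulator loop over range(pos, len(vet)).
import Mathlib
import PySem

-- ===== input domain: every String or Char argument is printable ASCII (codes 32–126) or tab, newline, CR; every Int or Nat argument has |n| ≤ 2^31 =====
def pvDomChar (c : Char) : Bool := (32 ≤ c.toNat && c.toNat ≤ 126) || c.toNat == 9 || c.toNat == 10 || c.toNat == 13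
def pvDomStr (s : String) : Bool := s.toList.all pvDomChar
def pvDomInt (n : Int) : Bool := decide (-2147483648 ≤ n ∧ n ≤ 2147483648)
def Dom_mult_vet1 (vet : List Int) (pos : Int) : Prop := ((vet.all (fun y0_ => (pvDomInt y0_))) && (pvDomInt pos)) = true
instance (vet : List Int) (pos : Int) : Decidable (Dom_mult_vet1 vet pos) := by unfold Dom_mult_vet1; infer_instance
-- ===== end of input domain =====

-- B replaces A's tail recursion (with dead empty/last-element branches) by one iterative accumulator loop; objective: simpler.


-- ===== PORT A =====
-- recursion on the tail: vet[pos] * mult_vet1(vet, pos+1); the raise branch (excluded by Pre_) returns 0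
def mult_vet1 (vet : List Int) (pos : Int) : Int :=
  if pos < 0 ∨ pos ≥ (vet.length : Int) then 0          -- raise ValueError (outside Pre_)
  else if vet.length = 0 then 0
  else if pos = (vet.length : Int) - 1 then PySem.List.pyGetD vet pos 0
  else PySem.List.pyGetD vet pos 0 * mult_vet1 vet (pos + 1)
termination_by ((vet.length : Int) - pos).toNat
decreasing_by omega

-- ===== PORT B =====
-- iterative accumulator: result = 1; for i in range(pos, len(vet)): result *= vet[i]
def mult_vet1_alt (vet : List Int) (pos : Int) : Int :=
  if pos < 0 ∨ pos ≥ (vet.length : Int) then 0          -- raise ValueError (outside Pre_)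
  else (PySem.List.pyRange pos (vet.length : Int) 1).foldl
         (fun result i => result * PySem.List.pyGetD vet i 0) 1

-- ===== PRECONDITION & SPEC =====
-- A raises ValueError whenever pos < 0 or pos >= len(vet) (so also on every empty vet); those inputs are excluded.
def Pre_mult_vet1 (vet : List Int) (pos : Int) : Prop := 0 ≤ pos ∧ pos < (vet.length : Int)
instance (vet : List Int) (pos : Int) : Decidable (Pre_mult_vet1 vet pos) := by unfold Pre_mult_vet1; infer_instance
def pvWitness_mult_vet1 : List Int × Int := ([2, 3, 4], 1)
def Spec_mult_vet1 (vet : List Int) (pos : Int) (out : Int) : Prop := out = mult_vet1_alt vet pos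
instance (vet : List Int) (pos : Int) (out : Int) : Decidable (Spec_mult_vet1 vet pos out) := by unfold Spec_mult_vet1; infer_instance

-- ===== CLAIM (what is proved, stated in full; the proofs are below) =====
def Claim_equal_mult_vet1 : Prop := ∀ (vet : List Int) (pos : Int), Dom_mult_vet1 vet pos → Pre_mult_vet1 vet pos → Spec_mult_vet1 vet pos (mult_vet1 vet pos)

-- ===== LEMMAS AND PROOFS =====

-- pulling the accumulator out of B's fold
theorem foldl_mul_acc (vet : List Int) (l : List Int) (a : Int) :
    l.foldl (fun result i => result * PySem.List.pyGetD vet i 0) a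
      = a * l.foldl (fun result i => result * PySem.List.pyGetD vet i 0) 1 := by
  induction l generalizing a with
  | nil => simp
  | cons x xs ih =>
    simp only [List.foldl_cons]
    rw [ih (a * PySem.List.pyGetD vet x 0), ih (1 * PySem.List.pyGetD vet x 0)]
    ring

theorem mult_vet1_eq_alt (vet : List Int) (n : Nat) :
    ∀ pos : Int, 0 ≤ pos → pos < (vet.length : Int) →
      (((vet.length : Int) - pos).toNat = n) →
      mult_vet1 vet pos
        = (PySem.List.pyRange pos (vet.length : Int) 1).foldl
            (fun result i => result * PySem.List.pyGetD vet i 0) 1 := by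
  induction n with
  | zero => intro pos h0 hlt hn; omega
  | succ n ih =>
    intro pos h0 hlt hn
    rw [PySem.List.pyRange_one_cons hlt, List.foldl_cons, foldl_mul_acc, one_mul]
    unfold mult_vet1
    have hne : ¬ (pos < 0 ∨ pos ≥ (vet.length : Int)) := by omega
    rw [if_neg hne]
    have hlen : ¬ vet.length = 0 := by omega
    rw [if_neg hlen]
    by_cases hlast : pos = (vet.length : Int) - 1
    · rw [if_pos hlast]
      have : (vet.length : Int) ≤ pos + 1 := by omega
      rw [PySem.List.pyRange_one_eq_nil this]
      simp
    · rw [if_neg hlast]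
      rw [ih (pos + 1) (by omega) (by omega) (by omega)]

-- ===== VERDICT (by name: the statement is the Claim_ definition above) =====
theorem mult_vet1_spec : Claim_equal_mult_vet1 := by
  intro vet pos _ hpre
  obtain ⟨h0, hlt⟩ := hpre
  unfold Spec_mult_vet1 mult_vet1_alt
  rw [if_neg (by omega : ¬ (pos < 0 ∨ pos ≥ (vet.length : Int)))]
  exact mult_vet1_eq_alt vet ((vet.length : Int) - pos).toNat pos h0 hlt rfl
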